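-- pv_equiv track=rewrite | github.com/txarlye/find_video_duplicates | src/services/Plex/plex_edition_creator.py | validate_edition_name
-- ===== SOURCE A (Python) =====
-- def validate_edition_name(edition_name: str) -> bool:
--     """
--     Valida si el nombre de la edición es válido para Plex
--
--     Args:
--         edition_name: Nombre de la edición
--
--     Returns:
--         True si es válido, False si no
--     """
--     if not edition_name or not edition_name.strip():
--         return False
--
--     # Caracteres no permitidos en nombres de archivo
--     invalid_chars = ['<', '>', ':', '"', '|', '?', '*', '\\', '/']
--
--     for char in invalid_chars:
--         if char in edition_name:
--             return False
--
--     return True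
-- ===== SOURCE B (Python) =====
-- def validate_edition_name(edition_name: str) -> bool:
--     if not edition_name or not edition_name.strip():
--         return False
--     invalid_set = {'<', '>', ':', '"', '|', '?', '*', '\\', '/'}
--     for c in edition_name:
--         if c in invalid_set:
--             return False
--     return True
-- ===== Notes on version B (the rewrite author's own statement) =====
-- stated objective: idiomatic
-- what changed: Instead of scanning the whole string once per forbidden character (9 substring searches), B makes a single pass over the string's characters, rejecting on the first character found in a set of forbidden characters.
import Mathlib
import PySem

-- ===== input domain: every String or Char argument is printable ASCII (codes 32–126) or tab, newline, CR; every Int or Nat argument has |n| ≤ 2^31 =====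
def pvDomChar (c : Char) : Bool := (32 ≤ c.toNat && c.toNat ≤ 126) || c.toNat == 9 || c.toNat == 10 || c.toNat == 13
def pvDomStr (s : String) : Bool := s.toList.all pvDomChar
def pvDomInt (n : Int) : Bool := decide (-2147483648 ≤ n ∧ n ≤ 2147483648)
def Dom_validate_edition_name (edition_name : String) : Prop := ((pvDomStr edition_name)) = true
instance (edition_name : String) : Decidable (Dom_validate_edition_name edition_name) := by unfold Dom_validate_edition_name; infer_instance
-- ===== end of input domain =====

-- B replaces A's nine substring scans (one per forbidden character) with a single pass over the
-- string's characters against a set of forbidden characters; idiomatic, same exact result.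


-- ===== PORT A =====
-- invalid_chars = ['<', '>', ':', '"', '|', '?', '*', '\\', '/']
def vaInvalidChars : List String := ["<", ">", ":", "\"", "|", "?", "*", "\\", "/"]

-- 'for char in invalid_chars: if char in edition_name: return False'
def vaLoop (s : String) : List String → Bool
  | [] => true
  | c :: rest => if PySem.Str.isIn c s then false else vaLoop s rest

def validate_edition_name (edition_name : String) : Bool :=
  if edition_name = "" || PySem.Str.strip edition_name = "" then false
  else vaLoop edition_name vaInvalidChars

-- ===== PORT B =====
def vbInvalidSet : PySem.Set Char := PySem.Set.ofList ['<', '>', ':', '"', '|', '?', '*', '\\', '/']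

-- 'for c in edition_name: if c in invalid_set: return False'
def vbLoop : List Char → Bool
  | [] => true
  | c :: rest => if PySem.Set.contains vbInvalidSet c then false else vbLoop rest

def validate_edition_name_alt (edition_name : String) : Bool :=
  if edition_name = "" || PySem.Str.strip edition_name = "" then false
  else vbLoop edition_name.toList

-- ===== PRECONDITION & SPEC =====
def Spec_validate_edition_name (edition_name : String) (out : Bool) : Prop := out = validate_edition_name_alt edition_name
instance (edition_name : String) (out : Bool) : Decidable (Spec_validate_edition_name edition_name out) := by unfold Spec_validate_edition_name; infer_instance

-- ===== CLAIM (what is proved, stated in full; the proofs are below) =====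
def Claim_equal_validate_edition_name : Prop := ∀ (edition_name : String), Dom_validate_edition_name edition_name → Spec_validate_edition_name edition_name (validate_edition_name edition_name)

-- ===== LEMMAS AND PROOFS =====

lemma singleton_infix_iff_mem (a : Char) (l : List Char) : [a] <:+: l ↔ a ∈ l := by
  constructor
  · rintro ⟨s, t, rfl⟩; simp
  · intro h
    obtain ⟨s, t, rfl⟩ := List.append_of_mem h
    exact ⟨s, t, by simp⟩

lemma isIn_singleton (a : Char) (cs : List Char) :
    PySem.Chars.isIn [a] cs = cs.contains a := by
  rw [Bool.eq_iff_iff, PySem.Chars.isIn_iff_infix, singleton_infix_iff_mem, List.contains_eq_mem]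
  simp

lemma vaLoop_eq_all (s : String) (l : List String) :
    vaLoop s l = l.all (fun c => !PySem.Str.isIn c s) := by
  induction l with
  | nil => rfl
  | cons c rest ih =>
    simp only [vaLoop, ih, List.all_cons]
    split_ifs with h
    · rw [h]; simp
    · rw [Bool.not_eq_true] at h; rw [h]; simp

lemma vbLoop_eq_all (cs : List Char) :
    vbLoop cs = cs.all (fun c => !PySem.Set.contains vbInvalidSet c) := by
  induction cs with
  | nil => rfl
  | cons c rest ih =>
    simp only [vbLoop, ih, List.all_cons]
    split_ifs with h
    · rw [h]; simp
    · rw [Bool.not_eq_true] at h; rw [h]; simp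

lemma loops_agree (s : String) : vaLoop s vaInvalidChars = vbLoop s.toList := by
  rw [vaLoop_eq_all, vbLoop_eq_all]
  have hset : vbInvalidSet = ['<', '>', ':', '"', '|', '?', '*', '\\', '/'] := by decide
  simp only [vaInvalidChars, List.all_cons, List.all_nil, PySem.Str.isIn_eq]
  have h1 : ("<" : String).toList = ['<'] := rfl
  have h2 : (">" : String).toList = ['>'] := rfl
  have h3 : (":" : String).toList = [':'] := rfl
  have h4 : ("\"" : String).toList = ['"'] := rfl
  have h5 : ("|" : String).toList = ['|'] := rfl
  have h6 : ("?" : String).toList = ['?'] := rfl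
  have h7 : ("*" : String).toList = ['*'] := rfl
  have h8 : ("\\" : String).toList = ['\\'] := rfl
  have h9 : ("/" : String).toList = ['/'] := rfl
  rw [h1, h2, h3, h4, h5, h6, h7, h8, h9]
  simp only [isIn_singleton, hset]
  rw [Bool.eq_iff_iff]
  simp only [Bool.and_eq_true, Bool.not_eq_true', List.contains_eq_mem, decide_eq_false_iff_not,
    List.all_eq_true, PySem.Set.contains_eq_listContains, List.mem_cons, List.not_mem_nil, or_false,
    and_true]
  constructor
  · rintro ⟨k1, k2, k3, k4, k5, k6, k7, k8, k9⟩ c hc hor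
    rcases hor with rfl | rfl | rfl | rfl | rfl | rfl | rfl | rfl | rfl
    exacts [k1 hc, k2 hc, k3 hc, k4 hc, k5 hc, k6 hc, k7 hc, k8 hc, k9 hc]
  · intro h
    exact ⟨fun hm => h _ hm (by simp), fun hm => h _ hm (by simp), fun hm => h _ hm (by simp),
      fun hm => h _ hm (by simp), fun hm => h _ hm (by simp), fun hm => h _ hm (by simp),
      fun hm => h _ hm (by simp), fun hm => h _ hm (by simp), fun hm => h _ hm (by simp)⟩

theorem validate_edition_name_spec : Claim_equal_validate_edition_name := by
  intro s _
  unfold Spec_validate_edition_name validate_edition_name validate_edition_name_alt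
  split_ifs with h
  · rfl
  · exact loops_agree s
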